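-- pv_equiv track=rewrite | github.com/joelnkn/sparse-einsum | speinsum/compiler.py | parse_einsum_equation
-- ===== SOURCE A (Python) =====
-- from typing import List, Tuple
--
-- def parse_einsum_equation(equation: str) -> Tuple[List[str], str]:
--     """Parse an einsum equation into input subscripts and output subscript.
--
--     Args:
--         equation: String of the form "ij,jk->ik"
--
--     Returns:
--         Tuple of (input_subscripts, output_subscript)
--         where input_subscripts is a list of strings for each input tensor
--         and output_subscript is a string for the output tensor
--     """
--     equation_sides = equation.split("->")
--
--     inputs = equation_sides[0]
--     input_subscripts = [s.strip() for s in inputs.split(",")]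
--
--     if len(equation_sides) > 2:
--         raise ValueError("Invalid einsum equation.")
--
--     if len(equation_sides) == 1:
--         # Implicit output. The output indices are all non-repeated indices in the input, sorted alphabetically.
--         included_indices = set()
--         excluded_indices = set()
--
--         for index in "".join(input_subscripts):
--             if index in included_indices:
--                 excluded_indices.add(index)
--             else:
--                 included_indices.add(index)
--
--         output = "".join(sorted(included_indices - excluded_indices))
--     else:
--         # Explicit output.
--         output = equation_sides[1]
--
--     return input_subscripts, output.strip()
-- ===== SOURCE B (Python) =====
-- from typing import List, Tuple
--
--
-- def parse_einsum_equation(equation: str) -> Tuple[List[str], str]: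
--     """Parse an einsum equation into input subscripts and output subscript."""
--     equation_sides = equation.split("->")
--
--     if len(equation_sides) > 2:
--         raise ValueError("Invalid einsum equation.")
--
--     input_subscripts = [s.strip() for s in equation_sides[0].split(",")]
--
--     if len(equation_sides) == 2:
--         # Explicit output.
--         output = equation_sides[1]
--     else:
--         # Implicit output: sort all index characters.  In the sorted sequence
--         # the non-repeated indices are exactly the runs of length 1, and they
--         # appear already in alphabetical order -- no set or dict is needed.
--         chars = sorted("".join(input_subscripts))
--         singles = []
--         i = 0
--         n = len(chars)
--         while i < n:
--             j = i + 1
--             while j < n and chars[j] == chars[i]: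
--                 j += 1
--             if j == i + 1:
--                 singles.append(chars[i])
--             i = j
--         output = "".join(singles)
--
--     return input_subscripts, output.strip()
-- ===== Notes on version B (the rewrite author's own statement) =====
-- stated objective: alternative
-- what changed: The implicit-output branch drops A's included/excluded running sets entirely: B sorts all index characters once and then emits, by a run-length scan over the sorted sequence, exactly the characters whose run has length 1 -- the output is produced already in alphabetical order, with no set, dict or final sort of a deduplicated collection.
import Mathlib
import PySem

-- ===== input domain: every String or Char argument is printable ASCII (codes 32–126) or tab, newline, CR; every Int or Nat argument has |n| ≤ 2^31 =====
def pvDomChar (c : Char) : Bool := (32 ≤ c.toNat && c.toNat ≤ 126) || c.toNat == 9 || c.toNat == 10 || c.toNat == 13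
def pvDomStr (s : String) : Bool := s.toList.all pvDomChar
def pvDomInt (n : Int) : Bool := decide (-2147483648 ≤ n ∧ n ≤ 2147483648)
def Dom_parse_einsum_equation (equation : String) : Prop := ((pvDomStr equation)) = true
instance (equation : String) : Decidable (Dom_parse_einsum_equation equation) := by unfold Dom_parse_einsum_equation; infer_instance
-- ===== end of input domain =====

-- B replaces A's running included/excluded two-set branching by sort-then-run-scan:
-- all index characters are sorted once and the runs of length 1 are emitted in order
-- (already alphabetical) — a different algorithm using no set at all, similar cost.


-- ===== PORT A =====
-- the body of A's 'for index in ...' loop over the (included, excluded) pair of sets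
def pvStepA (p : PySem.Set Char × PySem.Set Char) (index : Char) :
    PySem.Set Char × PySem.Set Char :=
  if PySem.Set.contains p.1 index then (p.1, PySem.Set.add p.2 index)
  else (PySem.Set.add p.1 index, p.2)

def parse_einsum_equation (equation : String) : List String × String :=
  let equation_sides := (PySem.Str.split? equation "->").getD []  -- sep "->" ≠ "": split? is never none
  let inputs := (PySem.List.pyGet? equation_sides 0).getD ""      -- equation_sides[0]; a split result is never empty
  let input_subscripts := ((PySem.Str.split? inputs ",").getD []).map PySem.Str.strip
  -- 'if len(equation_sides) > 2: raise ValueError' — those inputs are excluded by Pre_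
  let output :=
    if equation_sides.length == 1 then
      -- implicit output: included/excluded running sets over the joined subscripts
      let pair := (PySem.Str.join "" input_subscripts).toList.foldl pvStepA
        (PySem.Set.empty, PySem.Set.empty)
      PySem.Str.join ""
        ((PySem.List.sorted (PySem.Set.diff pair.1 pair.2) (fun x => x) false).map
          (fun c => String.ofList [c]))
    else (PySem.List.pyGet? equation_sides 1).getD ""             -- equation_sides[1]
  (input_subscripts, PySem.Str.strip output)

-- ===== PORT B =====
-- B's run scan over the sorted character list: 'i' walks run by run (the inner while
-- advances j over the run of chars[i]); a run of length 1 contributes its character.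
def pvRunScan : List Char → List Char
  | [] => []
  | a :: t =>
    -- j == i + 1  ↔  the run of a after a itself is empty
    (if t.takeWhile (fun c => c == a) = [] then [a] else []) ++
      pvRunScan (t.dropWhile (fun c => c == a))
termination_by l => l.length
decreasing_by
  simpa using Nat.lt_succ_of_le (t.length_dropWhile_le (fun c => c == a))

def parse_einsum_equation_alt (equation : String) : List String × String :=
  let equation_sides := (PySem.Str.split? equation "->").getD []
  -- 'if len(equation_sides) > 2: raise ValueError' — those inputs are excluded by Pre_
  let input_subscripts :=
    ((PySem.Str.split? ((PySem.List.pyGet? equation_sides 0).getD "") ",").getD []).map PySem.Str.strip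
  let output :=
    if equation_sides.length == 2 then (PySem.List.pyGet? equation_sides 1).getD ""
    else
      -- implicit output: sort all index characters, emit the runs of length 1
      let chars := PySem.List.sorted (PySem.Str.join "" input_subscripts).toList (fun x => x) false
      PySem.Str.join "" ((pvRunScan chars).map (fun c => String.ofList [c]))
  (input_subscripts, PySem.Str.strip output)

-- ===== PRECONDITION & SPEC =====
-- Pre_ excludes exactly the inputs where A raises ValueError: equations containing "->" more
-- than once (three or more split pieces). A split with a nonempty separator always yields at
-- least one piece, so 'length = 1 ∨ length = 2' is exactly 'at most one "->"'.
def Pre_parse_einsum_equation (equation : String) : Prop :=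
  ((PySem.Str.split? equation "->").getD []).length = 1 ∨
  ((PySem.Str.split? equation "->").getD []).length = 2
instance (equation : String) : Decidable (Pre_parse_einsum_equation equation) := by
  unfold Pre_parse_einsum_equation; infer_instance
def pvWitness_parse_einsum_equation : String := "ij,jk->ik"
def Spec_parse_einsum_equation (equation : String) (out : List String × String) : Prop := out = parse_einsum_equation_alt equation
instance (equation : String) (out : List String × String) : Decidable (Spec_parse_einsum_equation equation out) := by unfold Spec_parse_einsum_equation; infer_instance

-- ===== CLAIM (what is proved, stated in full; the proofs are below) =====
def Claim_equal_parse_einsum_equation : Prop := ∀ (equation : String), Dom_parse_einsum_equation equation → Pre_parse_einsum_equation equation → Spec_parse_einsum_equation equation (parse_einsum_equation equation)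

-- ===== LEMMAS AND PROOFS =====

-- A's loop, characterised: the first set collects every index (first occurrences, in order),
-- the second set holds exactly the indices occurring at least twice.
theorem foldA_char (cs : List Char) :
    (cs.foldl pvStepA (PySem.Set.empty, PySem.Set.empty)).1 = PySem.Set.ofList cs ∧
    ∀ c, ((cs.foldl pvStepA (PySem.Set.empty, PySem.Set.empty)).2).contains c
          = decide (2 ≤ cs.count c) := by
  induction cs using List.reverseRecOn with
  | nil =>
    refine ⟨rfl, fun c => ?_⟩
    simp [PySem.Set.empty, PySem.Set.contains]
  | append_singleton cs x ih =>
    obtain ⟨h1, h2⟩ := ih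
    rw [List.foldl_append] at *
    simp only [List.foldl_cons, List.foldl_nil]
    have hofl : PySem.Set.ofList (cs ++ [x]) = PySem.Set.add (PySem.Set.ofList cs) x := by
      rw [PySem.Set.ofList_eq_foldl, PySem.Set.ofList_eq_foldl, List.foldl_append]
      rfl
    set r := cs.foldl pvStepA (PySem.Set.empty, PySem.Set.empty) with hr
    by_cases hx : x ∈ cs
    · have hcont : PySem.Set.contains r.1 x = true := by
        rw [h1, PySem.Set.contains_iff, PySem.Set.mem_ofList]; exact hx
      rw [pvStepA, hcont]
      simp only [if_true]
      refine ⟨?_, fun c => ?_⟩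
      · rw [hofl, PySem.Set.add]
        have : PySem.Set.contains (PySem.Set.ofList cs) x = true := by
          rw [PySem.Set.contains_iff, PySem.Set.mem_ofList]; exact hx
        rw [this, if_pos rfl, h1]
      · by_cases hcx : c = x
        · subst hcx
          have hmem : (r.2.add c).contains c = true := by
            rw [PySem.Set.contains_iff, PySem.Set.mem_add]; right; rfl
          have hcnt : 1 ≤ cs.count c := List.count_pos_iff.mpr hx
          have hca : (cs ++ [c]).count c = cs.count c + 1 := by
            simp [List.count_append]
          rw [hmem, hca]
          have : 2 ≤ cs.count c + 1 := by omega
          simp [this]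
        · have hca : (cs ++ [x]).count c = cs.count c := by
            have hz : [x].count c = 0 := List.count_eq_zero.mpr (by simp [hcx])
            rw [List.count_append, hz, Nat.add_zero]
          rw [hca, ← h2 c, Bool.eq_iff_iff, PySem.Set.contains_iff, PySem.Set.contains_iff,
            PySem.Set.mem_add]
          constructor
          · rintro (h | h)
            · exact h
            · exact absurd h hcx
          · exact Or.inl
    · have hcont : PySem.Set.contains r.1 x = false := by
        rw [h1]
        rw [Bool.eq_false_iff]
        intro hc
        rw [PySem.Set.contains_iff, PySem.Set.mem_ofList] at hc
        exact hx hc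
      rw [pvStepA, hcont]
      simp only [Bool.false_eq_true, if_false]
      refine ⟨by rw [hofl, h1], fun c => ?_⟩
      by_cases hcx : c = x
      · subst hcx
        have h0 : cs.count c = 0 := List.count_eq_zero.mpr hx
        have hca : (cs ++ [c]).count c = 1 := by simp [List.count_append, h0]
        rw [hca, h2 c, h0]
        simp
      · have hca : (cs ++ [x]).count c = cs.count c := by
          have hz : [x].count c = 0 := List.count_eq_zero.mpr (by simp [hcx])
          rw [List.count_append, hz, Nat.add_zero]
        rw [hca, h2 c]

-- B's run scan on a nondecreasing list: its members are exactly the characters of count 1,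
-- and it is strictly increasing.
theorem runScan_char (l : List Char) (hs : l.Pairwise (· ≤ ·)) :
    (∀ b, b ∈ pvRunScan l ↔ l.count b = 1) ∧ (pvRunScan l).Pairwise (· < ·) := by
  induction l using pvRunScan.induct with
  | case1 => simp [pvRunScan]
  | case2 a t ih =>
    rw [List.pairwise_cons] at hs
    obtain ⟨hle, hst⟩ := hs
    have htw : ∀ x ∈ t.takeWhile (fun c => c == a), x = a := by
      intro x hx
      simpa using List.mem_takeWhile_imp hx
    have hsort' : (t.dropWhile (fun c => c == a)).Pairwise (· ≤ ·) :=
      hst.sublist (List.dropWhile_sublist _)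
    -- every element of the rest of the list after the run of a is > a
    have hdw : ∀ (l : List Char) (h : Char) (r : List Char),
        l.dropWhile (fun c => c == a) = h :: r → h ≠ a := by
      intro l
      induction l with
      | nil => intro h r hh; simp at hh
      | cons c cs ihl =>
        intro h r hh
        rw [List.dropWhile_cons] at hh
        split_ifs at hh with hc
        · exact ihl _ _ hh
        · cases hh; simpa using hc
    have hgt : ∀ x ∈ t.dropWhile (fun c => c == a), a < x := by
      intro x hx
      rcases he : t.dropWhile (fun c => c == a) with _ | ⟨h, r⟩
      · simp [he] at hx
      · have hpf : h ≠ a := hdw t h r he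
        have hhm : h ∈ t := (List.dropWhile_sublist _).subset
          (by rw [he]; exact List.mem_cons_self ..)
        have hah : a < h := lt_of_le_of_ne (hle h hhm) (Ne.symm hpf)
        rw [he] at hx
        rcases List.mem_cons.mp hx with rfl | hx
        · exact hah
        · rw [he] at hsort'
          exact lt_of_lt_of_le hah ((List.pairwise_cons.mp hsort').1 x hx)
    obtain ⟨ihm, ihp⟩ := ih hsort'
    have hnotd : a ∉ t.dropWhile (fun c => c == a) := fun h => lt_irrefl a (hgt a h)
    -- counts
    have hca : (a :: t).count a = 1 + (t.takeWhile (fun c => c == a)).length := by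
      rw [List.count_cons_self]
      conv_lhs => rw [← List.takeWhile_append_dropWhile (p := fun c => c == a) (l := t)]
      rw [List.count_append]
      have h1 : (t.takeWhile (fun c => c == a)).count a
          = (t.takeWhile (fun c => c == a)).length :=
        List.count_eq_length.mpr (fun b hb => ((htw b hb) ▸ rfl))
      have h2 : (t.dropWhile (fun c => c == a)).count a = 0 :=
        List.count_eq_zero.mpr hnotd
      omega
    have hcb : ∀ b, b ≠ a → (a :: t).count b = (t.dropWhile (fun c => c == a)).count b := by
      intro b hb
      rw [List.count_cons]
      simp only [beq_iff_eq, if_neg (Ne.symm hb), add_zero]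
      conv_lhs => rw [← List.takeWhile_append_dropWhile (p := fun c => c == a) (l := t)]
      rw [List.count_append]
      have h1 : (t.takeWhile (fun c => c == a)).count b = 0 :=
        List.count_eq_zero.mpr (fun hm => hb (htw b hm))
      omega
    constructor
    · intro b
      rw [pvRunScan]
      by_cases hb : b = a
      · subst hb
        have hnotr : b ∉ pvRunScan (t.dropWhile (fun c => c == b)) := by
          intro h
          exact hnotd (List.count_pos_iff.mp (by rw [(ihm b).mp h]; omega))
        rw [hca, List.mem_append]
        constructor
        · rintro (hm | hm)
          · split_ifs at hm with hT
            · rw [hT]; simp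
            · simp at hm
          · exact absurd hm hnotr
        · intro hcnt1
          have hT : t.takeWhile (fun c => c == b) = [] :=
            List.eq_nil_of_length_eq_zero (by omega)
          rw [hT]
          simp
      · rw [hcb b hb, List.mem_append]
        constructor
        · rintro (hm | hm)
          · split_ifs at hm <;> simp at hm
            exact absurd hm hb
          · exact (ihm b).mp hm
        · intro h
          exact Or.inr ((ihm b).mpr h)
    · rw [pvRunScan]
      split_ifs with hT
      · simp only [List.singleton_append]
        rw [List.pairwise_cons]
        refine ⟨fun x hx => hgt x ?_, ihp⟩
        exact List.count_pos_iff.mp (by rw [(ihm x).mp hx]; omega)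
      · simpa using ihp


-- the two implicit-output index lists coincide
theorem selected_eq (cs : List Char) :
    PySem.List.sorted
        (PySem.Set.diff (cs.foldl pvStepA (PySem.Set.empty, PySem.Set.empty)).1
          (cs.foldl pvStepA (PySem.Set.empty, PySem.Set.empty)).2) (fun x => x) false
      = pvRunScan (PySem.List.sorted cs (fun x => x) false) := by
  obtain ⟨h1, h2⟩ := foldA_char cs
  have hSs : (PySem.List.sorted cs (fun x => x) false).Pairwise (· ≤ ·) := by
    simpa using PySem.List.sorted_pairwise cs (fun x => x)
  obtain ⟨hm, hp⟩ := runScan_char _ hSs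
  have hSc : ∀ b, (PySem.List.sorted cs (fun x => x) false).count b = cs.count b :=
    fun b => (PySem.List.sorted_perm cs (fun x => x) false).count_eq b
  -- the diff list and the run-scan list have the same members: the count-1 characters
  have hmemF : ∀ b, b ∈ PySem.Set.diff (cs.foldl pvStepA (PySem.Set.empty, PySem.Set.empty)).1
      (cs.foldl pvStepA (PySem.Set.empty, PySem.Set.empty)).2 ↔ cs.count b = 1 := by
    intro b
    rw [PySem.Set.mem_diff, h1, PySem.Set.mem_ofList]
    constructor
    · rintro ⟨hmem, hnot⟩
      have hlt : ¬ 2 ≤ cs.count b := by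
        intro hge
        exact hnot (by rw [← PySem.Set.contains_iff, h2 b]; simpa using hge)
      have := List.count_pos_iff.mpr hmem
      omega
    · intro hc
      refine ⟨List.count_pos_iff.mp (by omega), fun hmem => ?_⟩
      rw [← PySem.Set.contains_iff, h2 b] at hmem
      simp at hmem
      omega
  have hFnd : (PySem.Set.diff (cs.foldl pvStepA (PySem.Set.empty, PySem.Set.empty)).1
      (cs.foldl pvStepA (PySem.Set.empty, PySem.Set.empty)).2).Nodup := by
    rw [h1]
    exact PySem.Set.nodup_diff _ _ (PySem.Set.nodup_ofList cs)
  have hRnd : (pvRunScan (PySem.List.sorted cs (fun x => x) false)).Nodup :=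
    hp.imp ne_of_lt
  have hperm : (pvRunScan (PySem.List.sorted cs (fun x => x) false)).Perm
      (PySem.Set.diff (cs.foldl pvStepA (PySem.Set.empty, PySem.Set.empty)).1
        (cs.foldl pvStepA (PySem.Set.empty, PySem.Set.empty)).2) := by
    rw [List.perm_ext_iff_of_nodup hRnd hFnd]
    intro b
    rw [hm b, hSc b, hmemF b]
  exact PySem.List.sorted_eq_of_perm_of_pairwise_lt _ _ _ hperm (by simpa using hp)

-- ===== VERDICT (by name: the statement is the Claim_ definition above) =====
theorem parse_einsum_equation_spec : Claim_equal_parse_einsum_equation := by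
  intro equation _ hpre
  unfold Spec_parse_einsum_equation
  unfold Pre_parse_einsum_equation at hpre
  simp only [parse_einsum_equation, parse_einsum_equation_alt]
  rcases hpre with h | h
  · simp only [h, show ((1:Nat) == 1) = true from rfl, show ((1:Nat) == 2) = false from rfl,
      if_true, Bool.false_eq_true, if_false]
    rw [selected_eq]
  · simp only [h, show ((2:Nat) == 1) = false from rfl, show ((2:Nat) == 2) = true from rfl,
      if_true, Bool.false_eq_true, if_false]
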